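-- pv_equiv track=rewrite | github.com/Stenardt-9002/CODECHEF-Datastructure-and-algo | Gfg_list/POTD/2023/2February/(1-02-2023)_Distinct_Colouring.py | distinctColoring
-- ===== SOURCE A (Python) =====
-- def distinctColoring (N, r, g, b):
--
--     # code here
--     arr1 = [0]*3
--     arr2 = [0]*3
--     arr1[0] = r[0]
--     arr1[1] = g[0]
--     arr1[2] = b[0]
--     for i in range(1,N):
--         arr2[0] = r[i]+min(arr1[1],arr1[2]);
--         arr2[1] = g[i]+min(arr1[0],arr1[2]);
--         arr2[2] = b[i]+min(arr1[0],arr1[1]);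
--
--         arr1[0] = arr2[0];
--         arr1[1] = arr2[1];
--         arr1[2] = arr2[2];
--
--     return min(arr1[0],arr1[1],arr1[2]);
-- ===== SOURCE B (Python) =====
-- def distinctColoring(N, r, g, b):
--     # Divide-and-conquer product of min-plus 3x3 transition matrices (None = +infinity):
--     # entry M[p][c] of row i's matrix is the cost of coloring row i with c given previous color p.
--     if N <= 1:
--         return min(r[0], g[0], b[0])
--     cost = (r, g, b)
--
--     def oadd(x, y):
--         return None if x is None or y is None else x + y
--
--     def omin(x, y):
--         if x is None:
--             return y
--         if y is None:
--             return x
--         return min(x, y)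
--
--     def mat(i):
--         return [[None if p == c else cost[c][i] for c in range(3)] for p in range(3)]
--
--     def mul(A, B):
--         return [[omin(oadd(A[p][0], B[0][c]),
--                       omin(oadd(A[p][1], B[1][c]), oadd(A[p][2], B[2][c])))
--                  for c in range(3)] for p in range(3)]
--
--     def prod(lo, hi):  # min-plus product of the matrices of rows lo..hi-1
--         if hi - lo == 1:
--             return mat(lo)
--         mid = (lo + hi) // 2
--         return mul(prod(lo, mid), prod(mid, hi))
--
--     P = prod(1, N)
--     best = None
--     for p in range(3):
--         for c in range(3):
--             best = omin(best, oadd(cost[p][0], P[p][c]))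
--     return best
-- ===== Notes on version B (the rewrite author's own statement) =====
-- stated objective: alternative
-- what changed: Replaces the rolling 3-state DP with a divide-and-conquer min-plus product of 3x3 transition matrices (None as +infinity): each row becomes a matrix indexed by (previous color, current color), segments are combined by min-plus matrix multiplication recursively, and the answer is the min over the row-0 cost vector times the product matrix.
import Mathlib
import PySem

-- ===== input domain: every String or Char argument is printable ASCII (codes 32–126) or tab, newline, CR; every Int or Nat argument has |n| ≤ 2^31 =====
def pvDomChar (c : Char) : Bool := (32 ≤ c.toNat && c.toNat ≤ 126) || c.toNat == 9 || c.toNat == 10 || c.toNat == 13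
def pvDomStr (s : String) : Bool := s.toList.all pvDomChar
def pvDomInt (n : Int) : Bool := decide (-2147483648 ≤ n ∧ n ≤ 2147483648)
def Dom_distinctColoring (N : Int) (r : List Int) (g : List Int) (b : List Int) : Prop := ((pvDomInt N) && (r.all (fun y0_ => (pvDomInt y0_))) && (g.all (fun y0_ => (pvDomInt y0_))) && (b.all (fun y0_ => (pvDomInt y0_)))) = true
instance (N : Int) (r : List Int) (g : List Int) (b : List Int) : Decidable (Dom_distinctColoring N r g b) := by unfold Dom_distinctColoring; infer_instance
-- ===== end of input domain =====

-- ===== PORT A =====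
-- A: forward rolling 3-state DP. B: divide-and-conquer min-plus product of 3x3 transition
-- matrices (none = +infinity). Same results; B is an alternative algorithm, not faster.
def distinctColoring (N : Int) (r : List Int) (g : List Int) (b : List Int) : Int :=
  let arr1 : Int × Int × Int :=
    (PySem.List.pyGetD r 0 0, PySem.List.pyGetD g 0 0, PySem.List.pyGetD b 0 0)
  let arr1 := (PySem.List.pyRange 1 N 1).foldl
    (fun (a : Int × Int × Int) i =>
      (PySem.List.pyGetD r i 0 + min a.2.1 a.2.2,
       PySem.List.pyGetD g i 0 + min a.1 a.2.2,
       PySem.List.pyGetD b i 0 + min a.1 a.2.1)) arr1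
  min (min arr1.1 arr1.2.1) arr1.2.2

-- ===== PORT B =====
-- helpers of Source B; a Python Optional[int] with None = +infinity is WithTop Int (= Option Int)
def pvOadd : WithTop Int → WithTop Int → WithTop Int
  | some a, some b => some (a + b)
  | _, _ => none

def pvOmin : WithTop Int → WithTop Int → WithTop Int
  | none, y => y
  | some a, none => some a
  | some a, some b => some (min a b)

-- cost = (r, g, b) indexed by color
def pvCost (r g b : List Int) : Fin 3 → List Int := fun c => [r, g, b].get c

-- mat(i): entry (p, c) = cost of coloring row i with c when the previous color is p
def pvMat (r g b : List Int) (i : Int) : Fin 3 → Fin 3 → WithTop Int :=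
  fun p c => if p = c then none else some (PySem.List.pyGetD (pvCost r g b c) i 0)

-- min-plus 3x3 matrix product
def pvMul (A B : Fin 3 → Fin 3 → WithTop Int) : Fin 3 → Fin 3 → WithTop Int :=
  fun p c => pvOmin (pvOadd (A p 0) (B 0 c))
               (pvOmin (pvOadd (A p 1) (B 1 c)) (pvOadd (A p 2) (B 2 c)))

-- prod(lo, hi): min-plus product of the matrices of rows lo..hi-1 (always called with
-- lo < hi; the `≤ 1` guard only makes the recursion total — Python's test is `hi - lo == 1`)
def pvProdM (r g b : List Int) (lo hi : Int) : Fin 3 → Fin 3 → WithTop Int :=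
  if hi - lo ≤ 1 then pvMat r g b lo
  else
    let mid := PySem.Int.floordiv (lo + hi) 2
    pvMul (pvProdM r g b lo mid) (pvProdM r g b mid hi)
termination_by (hi - lo).toNat
decreasing_by
  all_goals
    have h1 := PySem.Int.floordiv_mul_add_mod (lo + hi) 2
    have h2 := PySem.Int.mod_nonneg (lo + hi) (b := 2) (by norm_num)
    have h3 := PySem.Int.mod_lt (lo + hi) (b := 2) (by norm_num)
    omega

def distinctColoring_alt (N : Int) (r : List Int) (g : List Int) (b : List Int) : Int :=
  if N ≤ 1 then
    min (min (PySem.List.pyGetD r 0 0) (PySem.List.pyGetD g 0 0)) (PySem.List.pyGetD b 0 0)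
  else
    let P := pvProdM r g b 1 N
    let best : WithTop Int := (List.finRange 3).foldl (fun acc p =>
      (List.finRange 3).foldl (fun acc c =>
        pvOmin acc (pvOadd (some (PySem.List.pyGetD (pvCost r g b p) 0 0)) (P p c))) acc) none
    best.getD 0   -- best is always `some` here (proved below); Python returns the int directly

-- ===== PRECONDITION & SPEC =====
-- Pre_ excludes exactly the inputs where Python A raises IndexError: an empty cost list
-- (r[0]/g[0]/b[0] is read unconditionally) or a list shorter than N.
def Pre_distinctColoring (N : Int) (r : List Int) (g : List Int) (b : List Int) : Prop :=
  r ≠ [] ∧ g ≠ [] ∧ b ≠ [] ∧ N ≤ (r.length : Int) ∧ N ≤ (g.length : Int) ∧ N ≤ (b.length : Int)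
instance (N : Int) (r : List Int) (g : List Int) (b : List Int) : Decidable (Pre_distinctColoring N r g b) := by unfold Pre_distinctColoring; infer_instance
def pvWitness_distinctColoring : Int × List Int × List Int × List Int := (3, [1, 2, 3], [4, 5, 6], [7, 8, 9])

def Spec_distinctColoring (N : Int) (r : List Int) (g : List Int) (b : List Int) (out : Int) : Prop := out = distinctColoring_alt N r g b
instance (N : Int) (r : List Int) (g : List Int) (b : List Int) (out : Int) : Decidable (Spec_distinctColoring N r g b out) := by unfold Spec_distinctColoring; infer_instance

-- ===== CLAIM (what is proved, stated in full; the proofs are below) =====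
def Claim_equal_distinctColoring : Prop := ∀ (N : Int) (r : List Int) (g : List Int) (b : List Int), Dom_distinctColoring N r g b → Pre_distinctColoring N r g b → Spec_distinctColoring N r g b (distinctColoring N r g b)

-- ===== LEMMAS AND PROOFS =====

-- bridge: pvOmin / pvOadd are min / + on WithTop Int
theorem pvOmin_eq (x y : WithTop Int) : pvOmin x y = min x y := by
  cases x <;> cases y <;> rfl

theorem pvOadd_eq (x y : WithTop Int) : pvOadd x y = x + y := by
  cases x <;> cases y <;> rfl

theorem pv_none_top : (none : WithTop Int) = (⊤ : WithTop Int) := rfl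
theorem pv_some_zero : (some 0 : WithTop Int) = (0 : WithTop Int) := rfl
theorem pvOmin_none_left (x : WithTop Int) : pvOmin none x = x := rfl

-- min-plus identity matrix (proof-only)
def pvIdM : Fin 3 → Fin 3 → WithTop Int := fun p c => if p = c then some 0 else none

theorem pvMul_idM_right (A : Fin 3 → Fin 3 → WithTop Int) : pvMul A pvIdM = A := by
  funext p c
  fin_cases c <;> simp only [pvMul, pvIdM, pvOmin_eq, pvOadd_eq] <;>
    simp [pv_none_top, pv_some_zero]

theorem pvMul_idM_left (A : Fin 3 → Fin 3 → WithTop Int) : pvMul pvIdM A = A := by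
  funext p c
  fin_cases p <;> simp only [pvMul, pvIdM, pvOmin_eq, pvOadd_eq] <;>
    simp [pv_none_top, pv_some_zero]

-- associativity of the min-plus product
theorem pvMul_assoc (A B C : Fin 3 → Fin 3 → WithTop Int) :
    pvMul (pvMul A B) C = pvMul A (pvMul B C) := by
  funext p c
  simp only [pvMul, pvOmin_eq, pvOadd_eq, ← min_add_add_right, ← min_add_add_left, add_assoc]
  apply le_antisymm <;> simp

-- list product of matrices (proof-only)
def pvProdL (ms : List (Fin 3 → Fin 3 → WithTop Int)) : Fin 3 → Fin 3 → WithTop Int :=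
  ms.foldr pvMul pvIdM

theorem pvProdL_append (xs ys : List (Fin 3 → Fin 3 → WithTop Int)) :
    pvProdL (xs ++ ys) = pvMul (pvProdL xs) (pvProdL ys) := by
  induction xs with
  | nil => simp [pvProdL, pvMul_idM_left]
  | cons x t ih => simp only [pvProdL, List.cons_append, List.foldr_cons] at ih ⊢
                   rw [ih, ← pvMul_assoc]

-- B's divide-and-conquer product over rows lo..hi-1 = the list product of their matrices
theorem pvProdM_eq (r g b : List Int) : ∀ (n : Nat) (lo hi : Int), lo < hi → (hi - lo).toNat = n →
    pvProdM r g b lo hi = pvProdL ((PySem.List.pyRange lo hi 1).map (pvMat r g b)) := by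
  intro n
  induction n using Nat.strong_induction_on with
  | _ n ih =>
    intro lo hi h hn
    rw [pvProdM]
    by_cases hle : hi - lo ≤ 1
    · rw [if_pos hle]
      have : hi = lo + 1 := by omega
      subst this
      rw [PySem.List.pyRange_one_singleton, List.map_cons, List.map_nil]
      show pvMat r g b lo = pvMul (pvMat r g b lo) pvIdM
      rw [pvMul_idM_right]
    · rw [if_neg hle]
      show pvMul (pvProdM r g b lo (PySem.Int.floordiv (lo + hi) 2))
             (pvProdM r g b (PySem.Int.floordiv (lo + hi) 2) hi)
           = pvProdL ((PySem.List.pyRange lo hi 1).map (pvMat r g b))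
      have h1 := PySem.Int.floordiv_mul_add_mod (lo + hi) 2
      have h2 := PySem.Int.mod_nonneg (lo + hi) (b := 2) (by norm_num)
      have h3 := PySem.Int.mod_lt (lo + hi) (b := 2) (by norm_num)
      have hmid1 : lo < PySem.Int.floordiv (lo + hi) 2 := by omega
      have hmid2 : PySem.Int.floordiv (lo + hi) 2 < hi := by omega
      rw [PySem.List.pyRange_one_append lo (PySem.Int.floordiv (lo + hi) 2) hi
            (le_of_lt hmid1) (le_of_lt hmid2),
          List.map_append, pvProdL_append,
          ih _ (by omega) lo _ hmid1 rfl, ih _ (by omega) _ hi hmid2 rfl]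

-- ==== A-side: lifting the rolling triple into the matrix algebra ====
def pvAStep (r g b : List Int) (a : Int × Int × Int) (i : Int) : Int × Int × Int :=
  (PySem.List.pyGetD r i 0 + min a.2.1 a.2.2,
   PySem.List.pyGetD g i 0 + min a.1 a.2.2,
   PySem.List.pyGetD b i 0 + min a.1 a.2.1)

def pvLift (t : Int × Int × Int) : Fin 3 → WithTop Int :=
  fun c => [some t.1, some t.2.1, some t.2.2].get c

-- vector * matrix in the min-plus algebra
def pvVmul (v : Fin 3 → WithTop Int) (M : Fin 3 → Fin 3 → WithTop Int) : Fin 3 → WithTop Int :=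
  fun c => pvOmin (pvOadd (v 0) (M 0 c))
             (pvOmin (pvOadd (v 1) (M 1 c)) (pvOadd (v 2) (M 2 c)))

theorem pvVmul_idM (v : Fin 3 → WithTop Int) : pvVmul v pvIdM = v := by
  funext c
  fin_cases c <;> simp only [pvVmul, pvIdM, pvOmin_eq, pvOadd_eq] <;>
    simp [pv_none_top, pv_some_zero]

theorem pvVmul_assoc (v : Fin 3 → WithTop Int) (A B : Fin 3 → Fin 3 → WithTop Int) :
    pvVmul (pvVmul v A) B = pvVmul v (pvMul A B) := by
  funext c
  simp only [pvVmul, pvMul, pvOmin_eq, pvOadd_eq, ← min_add_add_right, ← min_add_add_left,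
    add_assoc]
  apply le_antisymm <;> simp

theorem pv_some_coe (z : Int) : (some z : WithTop Int) = (z : WithTop Int) := rfl

-- one A-step is a vector-matrix multiplication of the lifted state
theorem pvLift_step (r g b : List Int) (t : Int × Int × Int) (i : Int) :
    pvLift (pvAStep r g b t i) = pvVmul (pvLift t) (pvMat r g b i) := by
  funext c
  fin_cases c <;>
    (simp only [pvLift, pvAStep, pvVmul, pvMat, pvCost, List.get, pvOmin_eq, pvOadd_eq]
     simp only [pv_none_top, pv_some_coe]
     simp [← WithTop.coe_add, ← WithTop.coe_min]
     omega)

theorem pvLift_foldl (r g b : List Int) (l : List Int) :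
    ∀ t, pvLift (l.foldl (pvAStep r g b) t)
      = (l.map (pvMat r g b)).foldl pvVmul (pvLift t) := by
  induction l with
  | nil => intro t; rfl
  | cons x xs ih =>
    intro t
    simp only [List.foldl_cons, List.map_cons, ih, pvLift_step]

theorem foldl_pvVmul (ms : List (Fin 3 → Fin 3 → WithTop Int)) :
    ∀ v, ms.foldl pvVmul v = pvVmul v (pvProdL ms) := by
  induction ms with
  | nil => intro v; show v = pvVmul v pvIdM; rw [pvVmul_idM]
  | cons m t ih =>
    intro v
    simp only [List.foldl_cons, ih, pvProdL, List.foldr_cons]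
    rw [show List.foldr pvMul pvIdM t = pvProdL t from rfl, pvVmul_assoc]

-- rearrangement of the 9-term min (B's p-major accumulation vs column-major grouping)
theorem pvOmin9 (x00 x01 x02 x10 x11 x12 x20 x21 x22 : WithTop Int) :
    pvOmin (pvOmin (pvOmin (pvOmin (pvOmin (pvOmin (pvOmin (pvOmin x00 x01) x02) x10) x11) x12) x20) x21) x22
      = pvOmin (pvOmin (pvOmin x00 (pvOmin x10 x20)) (pvOmin x01 (pvOmin x11 x21)))
          (pvOmin x02 (pvOmin x12 x22)) := by
  simp only [pvOmin_eq]
  apply le_antisymm <;> simp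

-- B's accumulation chain, regrouped into columns = pvVmul of the lifted first row
theorem pvChainB (r g b : List Int) (M : Fin 3 → Fin 3 → WithTop Int) :
    pvOmin (pvOmin (pvOmin (pvOmin (pvOmin (pvOmin (pvOmin (pvOmin
        (pvOadd (some (PySem.List.pyGetD (pvCost r g b 0) 0 0)) (M 0 0))
        (pvOadd (some (PySem.List.pyGetD (pvCost r g b 0) 0 0)) (M 0 1)))
        (pvOadd (some (PySem.List.pyGetD (pvCost r g b 0) 0 0)) (M 0 2)))
        (pvOadd (some (PySem.List.pyGetD (pvCost r g b 1) 0 0)) (M 1 0)))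
        (pvOadd (some (PySem.List.pyGetD (pvCost r g b 1) 0 0)) (M 1 1)))
        (pvOadd (some (PySem.List.pyGetD (pvCost r g b 1) 0 0)) (M 1 2)))
        (pvOadd (some (PySem.List.pyGetD (pvCost r g b 2) 0 0)) (M 2 0)))
        (pvOadd (some (PySem.List.pyGetD (pvCost r g b 2) 0 0)) (M 2 1)))
        (pvOadd (some (PySem.List.pyGetD (pvCost r g b 2) 0 0)) (M 2 2))
      = pvOmin (pvOmin
          (pvVmul (pvLift (PySem.List.pyGetD r 0 0, PySem.List.pyGetD g 0 0, PySem.List.pyGetD b 0 0)) M 0)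
          (pvVmul (pvLift (PySem.List.pyGetD r 0 0, PySem.List.pyGetD g 0 0, PySem.List.pyGetD b 0 0)) M 1))
          (pvVmul (pvLift (PySem.List.pyGetD r 0 0, PySem.List.pyGetD g 0 0, PySem.List.pyGetD b 0 0)) M 2) := by
  exact pvOmin9 _ _ _ _ _ _ _ _ _

-- the equivalence
theorem pv_main (N : Int) (r g b : List Int) :
    distinctColoring N r g b = distinctColoring_alt N r g b := by
  by_cases hN : N ≤ 1
  · show distinctColoring N r g b = distinctColoring_alt N r g b
    unfold distinctColoring distinctColoring_alt
    rw [PySem.List.pyRange_one_eq_nil hN, if_pos hN]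
    rfl
  · have h1 : 1 < N := by omega
    have hv : pvVmul (pvLift (PySem.List.pyGetD r 0 0, PySem.List.pyGetD g 0 0, PySem.List.pyGetD b 0 0))
        (pvProdM r g b 1 N)
        = pvLift ((PySem.List.pyRange 1 N 1).foldl (pvAStep r g b)
            (PySem.List.pyGetD r 0 0, PySem.List.pyGetD g 0 0, PySem.List.pyGetD b 0 0)) := by
      rw [pvProdM_eq r g b (N - 1).toNat 1 N h1 (by omega), ← foldl_pvVmul, ← pvLift_foldl]
    have hfin : (List.finRange 3) = [0, 1, 2] := rfl
    unfold distinctColoring_alt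
    rw [if_neg hN]
    simp only [hfin, List.foldl_cons, List.foldl_nil, pvOmin_none_left]
    rw [pvChainB r g b (pvProdM r g b 1 N)]
    simp only [hv]
    rfl

-- ===== VERDICT (by name: the statement is the Claim_ definition above) =====
theorem distinctColoring_spec : Claim_equal_distinctColoring := by
  intro N r g b _ _
  exact pv_main N r g b
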